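-- pv_equiv track=rewrite | github.com/nyeap96/LeetCode | 492.py | constructRectangle
-- ===== SOURCE A (Python) =====
-- from typing import List
--
-- def constructRectangle(area: int) -> List[int]:
--     # okay so the three constraints mean the following
--     # that the rectangle will always be tall because its l >= w
--     # and the difference betwen l and w should be as small as possible
--     # the area must be equal as well
--
--     # so i think you should be able to do the following
--     # start with l = w which means l should be l/2 but if its not an integer then skip
--     # then you keep bringing l down until you find an l % n == 0 and then return that value
--     # so its actually not half but square root which is hard to calculate
--     # so instead what ill do is to just iterate backwards and store all results i see until w > l then return
--
--     # above is false meaning l and w are not the same so you have to start iterating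
--
--     res = [-1,-1]
--
--     for i in range(area , 0, -1):
--         if area % i == 0:
--             if (area // i) > i:
--                 break
--             else:
--                 res = [i,area // i]
--
--
--     return res
-- ===== SOURCE B (Python) =====
-- from typing import List
--
-- def constructRectangle(area: int) -> List[int]:
--     # Scan widths upward while w*w <= area; the last divisor found is the
--     # largest width not exceeding sqrt(area), so [area // w, w] is the answer.
--     if area <= 0:
--         return [-1, -1]
--     w = 1
--     best = 1
--     while w * w <= area:
--         if area % w == 0:
--             best = w
--         w += 1
--     return [area // best, best]
-- ===== Notes on version B (the rewrite author's own statement) =====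
-- stated objective: faster
-- what changed: Instead of scanning all candidate lengths downward from area itself, B scans widths upward only while w*w <= area and keeps the largest divisor found, so it touches O(sqrt(area)) candidates instead of O(area).
import Mathlib
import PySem

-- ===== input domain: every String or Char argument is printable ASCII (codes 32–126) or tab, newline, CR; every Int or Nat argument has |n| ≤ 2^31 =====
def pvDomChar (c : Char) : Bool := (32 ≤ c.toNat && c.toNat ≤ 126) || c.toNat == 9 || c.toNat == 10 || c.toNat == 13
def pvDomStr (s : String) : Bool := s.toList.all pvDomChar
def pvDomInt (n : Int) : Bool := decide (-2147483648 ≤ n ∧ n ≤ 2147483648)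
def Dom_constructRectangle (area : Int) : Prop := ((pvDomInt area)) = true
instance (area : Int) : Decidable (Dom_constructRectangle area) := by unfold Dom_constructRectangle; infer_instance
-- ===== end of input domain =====

-- B replaces A's downward scan over all of range(area, 0, -1) by an upward scan of
-- widths while w*w <= area (keeping the largest divisor seen): O(sqrt(area)) vs O(area).

-- ===== PORT A =====
-- the for-loop with break/else, recursing over the range list with `res` as state
def pvALoop (area : Int) : List Int → List Int → List Int
  | [], res => res
  | i :: rest, res =>
    if PySem.Int.mod area i = 0 then
      if PySem.Int.floordiv area i > i then res
      else pvALoop area rest [i, PySem.Int.floordiv area i]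
    else pvALoop area rest res

def constructRectangle (area : Int) : List Int :=
  pvALoop area (PySem.List.pyRange area 0 (-1)) [-1, -1]

-- ===== PORT B =====
-- the while-loop of Source B; the `1 ≤ w` conjunct only makes the recursion total
-- (every actual call has w ≥ 1, where it is implied)
def pvBLoop (area w best : Int) : List Int :=
  if h : 1 ≤ w ∧ w * w ≤ area then
    pvBLoop area (w + 1) (if PySem.Int.mod area w = 0 then w else best)
  else [PySem.Int.floordiv area best, best]
termination_by (area + 1 - w).toNat
decreasing_by
  have hw : w ≤ w * w := le_mul_of_one_le_left (by omega) h.1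
  omega

def constructRectangle_alt (area : Int) : List Int :=
  if area ≤ 0 then [-1, -1] else pvBLoop area 1 1

-- ===== PRECONDITION & SPEC =====
def Spec_constructRectangle (area : Int) (out : List Int) : Prop := out = constructRectangle_alt area
instance (area : Int) (out : List Int) : Decidable (Spec_constructRectangle area out) := by unfold Spec_constructRectangle; infer_instance

-- ===== CLAIM (what is proved, stated in full; the proofs are below) =====
def Claim_equal_constructRectangle : Prop := ∀ (area : Int), Dom_constructRectangle area → Spec_constructRectangle area (constructRectangle area)

-- ===== LEMMAS AND PROOFS =====

-- For d ∣ n with n ≤ d*d, the complementary divisor n/d is ≤ w0, hence i0 ≤ d: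
-- i0 = n/w0 is the least divisor whose square is ≥ n.
theorem pv_upper_least (n w0 i0 d : Int) (hn : 1 ≤ n) (hw : 1 ≤ w0) (hfac : n = w0 * i0)
    (hmax : ∀ v : Int, 1 ≤ v → v ∣ n → v * v ≤ n → v ≤ w0)
    (hd1 : 1 ≤ d) (hdd : d ∣ n) (hsq : n ≤ d * d) : i0 ≤ d := by
  obtain ⟨e, he⟩ := hdd
  have he1 : 1 ≤ e := by nlinarith
  have hed : e ≤ d := by nlinarith
  have hew : e ≤ w0 := hmax e he1 ⟨d, by rw [he, mul_comm]⟩ (by nlinarith)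
  nlinarith

-- below i0 the loop hits no storing divisor: the first divisor it meets breaks
theorem pv_aloop_low (n w0 i0 : Int) (hn : 1 ≤ n) (hw : 1 ≤ w0) (hfac : n = w0 * i0)
    (hmax : ∀ v : Int, 1 ≤ v → v ∣ n → v * v ≤ n → v ≤ w0) :
    ∀ (k : Nat) (m : Int), m.toNat ≤ k → m < i0 → ∀ res,
      pvALoop n (PySem.List.pyRange m 0 (-1)) res = res := by
  intro k
  induction k with
  | zero =>
    intro m hm _ res
    rw [PySem.List.pyRange_neg_one_eq_nil (by omega)]
    rfl
  | succ k ih =>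
    intro m hm hmi res
    by_cases hm0 : m ≤ 0
    · rw [PySem.List.pyRange_neg_one_eq_nil hm0]
      rfl
    · rw [PySem.List.pyRange_neg_one_cons (by omega : (0:Int) < m)]
      unfold pvALoop
      by_cases hdvd : PySem.Int.mod n m = 0
      · have hmd : m ∣ n := (PySem.Int.mod_eq_zero_iff_dvd n m).mp hdvd
        obtain ⟨e, he⟩ := hmd
        have hmm : m * m < n := by
          by_contra hc
          have := pv_upper_least n w0 i0 m hn hw hfac hmax (by omega) ⟨e, he⟩ (by omega)
          omega
        have hfd : PySem.Int.floordiv n m = e := by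
          rw [PySem.Int.floordiv_eq_ediv_of_pos (by omega), he,
            Int.mul_ediv_cancel_left _ (by omega : m ≠ 0)]
        have hme : m < e := by nlinarith
        simp [hdvd, hfd, hme]
      · simp only [hdvd, if_false]
        exact ih (m - 1) (by omega) (by omega) res

-- from any m with i0 ≤ m ≤ n the loop ends in [i0, w0]
theorem pv_aloop_main (n w0 i0 : Int) (hn : 1 ≤ n) (hw : 1 ≤ w0) (hfac : n = w0 * i0)
    (hwi : w0 ≤ i0)
    (hmax : ∀ v : Int, 1 ≤ v → v ∣ n → v * v ≤ n → v ≤ w0) :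
    ∀ (k : Nat) (m : Int), m.toNat ≤ k → i0 ≤ m → m ≤ n → ∀ res,
      pvALoop n (PySem.List.pyRange m 0 (-1)) res = [i0, w0] := by
  have hi1 : 1 ≤ i0 := by nlinarith
  intro k
  induction k with
  | zero => intro m hm hil _ _; omega
  | succ k ih =>
    intro m hm hil hiu res
    rw [PySem.List.pyRange_neg_one_cons (by omega : (0:Int) < m)]
    unfold pvALoop
    rcases eq_or_lt_of_le hil with heq | hlt
    · subst heq
      have hdvd : PySem.Int.mod n i0 = 0 :=
        (PySem.Int.mod_eq_zero_iff_dvd n i0).mpr ⟨w0, by rw [hfac, mul_comm]⟩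
      have hfd : PySem.Int.floordiv n i0 = w0 := by
        rw [PySem.Int.floordiv_eq_ediv_of_pos (by omega), hfac, mul_comm,
          Int.mul_ediv_cancel_left _ (by omega : i0 ≠ 0)]
      have hng : ¬ (i0 < w0) := by omega
      simp only [hdvd, if_true, hfd, gt_iff_lt, hng, if_false]
      exact pv_aloop_low n w0 i0 hn hw hfac hmax (i0 - 1).toNat (i0 - 1) le_rfl (by omega) _
    · by_cases hdvd : PySem.Int.mod n m = 0
      · have hmd : m ∣ n := (PySem.Int.mod_eq_zero_iff_dvd n m).mp hdvd
        obtain ⟨e, he⟩ := hmd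
        have he1 : 1 ≤ e := by nlinarith
        have hni : n ≤ i0 * i0 := by nlinarith
        have hem : ¬ (m < e) := by
          intro hc
          nlinarith
        simp only [hdvd, if_true, gt_iff_lt]
        rw [if_neg (by
          rw [PySem.Int.floordiv_eq_ediv_of_pos (by omega), he,
            Int.mul_ediv_cancel_left _ (by omega : m ≠ 0)]
          exact hem)]
        exact ih (m - 1) (by omega) (by omega) (by omega) _
      · simp only [hdvd, if_false]
        exact ih (m - 1) (by omega) (by omega) (by omega) res

-- B's upward scan ends in [i0, w0] as well
theorem pv_bloop_main (n w0 i0 : Int) (_hn : 1 ≤ n) (hw : 1 ≤ w0) (hfac : n = w0 * i0)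
    (hsq : w0 * w0 ≤ n)
    (hmax : ∀ v : Int, 1 ≤ v → v ∣ n → v * v ≤ n → v ≤ w0) :
    ∀ (k : Nat) (w best : Int), (n + 1 - w).toNat ≤ k → 1 ≤ w → 1 ≤ best → best ≤ w →
      best ∣ n → best * best ≤ n →
      (∀ v : Int, 1 ≤ v → v ∣ n → v * v ≤ n → v < w → v ≤ best) →
      pvBLoop n w best = [i0, w0] := by
  intro k
  induction k with
  | zero =>
    intro w best hk hw1 hb1 hbw hbd hbs hinv
    rw [pvBLoop]
    rw [dif_neg (by
      rintro ⟨h1, h2⟩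
      have : w ≤ w * w := le_mul_of_one_le_left (by omega) h1
      omega)]
    have hwn : ¬ (w * w ≤ n) := by
      intro hc
      have : w ≤ w * w := le_mul_of_one_le_left (by omega) hw1
      omega
    have hw0lt : w0 < w := by nlinarith
    have hb : best = w0 :=
      le_antisymm (hmax best hb1 hbd hbs) (hinv w0 hw ⟨i0, hfac⟩ hsq hw0lt)
    subst hb
    have hfd : PySem.Int.floordiv n best = i0 := by
      rw [PySem.Int.floordiv_eq_ediv_of_pos (by omega), hfac,
        Int.mul_ediv_cancel_left _ (by omega : best ≠ 0)]
    rw [hfd]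
  | succ k ih =>
    intro w best hk hw1 hb1 hbw hbd hbs hinv
    rw [pvBLoop]
    by_cases hc : 1 ≤ w ∧ w * w ≤ n
    · rw [dif_pos hc]
      have hwn : w ≤ n := le_trans (le_mul_of_one_le_left (by omega) hc.1) hc.2
      by_cases hdvd : PySem.Int.mod n w = 0
      · have hwd : w ∣ n := (PySem.Int.mod_eq_zero_iff_dvd n w).mp hdvd
        rw [if_pos hdvd]
        refine ih (w + 1) w (by omega) (by omega) (by omega) (by omega) hwd hc.2 ?_
        intro v hv1 hvd hvs hvw
        rcases lt_or_eq_of_le (by omega : v ≤ w) with h | h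
        · exact le_trans (hinv v hv1 hvd hvs h) hbw
        · omega
      · rw [if_neg hdvd]
        refine ih (w + 1) best (by omega) (by omega) hb1 (by omega) hbd hbs ?_
        intro v hv1 hvd hvs hvw
        rcases lt_or_eq_of_le (by omega : v ≤ w) with h | h
        · exact hinv v hv1 hvd hvs h
        · exfalso
          exact hdvd ((PySem.Int.mod_eq_zero_iff_dvd n w).mpr (h ▸ hvd))
    · rw [dif_neg hc]
      have hwn : ¬ (w * w ≤ n) := fun hc2 => hc ⟨hw1, hc2⟩
      have hw0lt : w0 < w := by nlinarith
      have hb : best = w0 :=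
        le_antisymm (hmax best hb1 hbd hbs) (hinv w0 hw ⟨i0, hfac⟩ hsq hw0lt)
      subst hb
      have hfd : PySem.Int.floordiv n best = i0 := by
        rw [PySem.Int.floordiv_eq_ediv_of_pos (by omega), hfac,
          Int.mul_ediv_cancel_left _ (by omega : best ≠ 0)]
      rw [hfd]

-- the largest divisor of n whose square is at most n
def pvW0 (n : Int) : Int :=
  (Nat.findGreatest (fun w => 0 < w ∧ (w : Int) ∣ n ∧ (w : Int) * w ≤ n) n.toNat : Int)

theorem pv_main (n : Int) (hn : 1 ≤ n) :
    constructRectangle n = constructRectangle_alt n := by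
  set P : Nat → Prop := fun w => 0 < w ∧ (w : Int) ∣ n ∧ (w : Int) * w ≤ n with hP
  have hP1 : P 1 := ⟨Nat.one_pos, one_dvd n, by push_cast; omega⟩
  have h1b : 1 ≤ n.toNat := by omega
  have hEq : pvW0 n = ((Nat.findGreatest P n.toNat : Nat) : Int) := rfl
  have hwpos : 1 ≤ pvW0 n := by
    have := Nat.le_findGreatest h1b hP1
    rw [hEq]
    exact_mod_cast this
  have hspec : P (Nat.findGreatest P n.toNat) := Nat.findGreatest_spec h1b hP1
  have hwd : pvW0 n ∣ n := hspec.2.1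
  have hws : pvW0 n * pvW0 n ≤ n := hspec.2.2
  have hmax : ∀ v : Int, 1 ≤ v → v ∣ n → v * v ≤ n → v ≤ pvW0 n := by
    intro v hv1 hvd hvs
    have hvn : v ≤ n := Int.le_of_dvd (by omega) hvd
    have hPv : P v.toNat := by
      refine ⟨by omega, ?_, ?_⟩
      · rwa [Int.toNat_of_nonneg (by omega)]
      · rwa [Int.toNat_of_nonneg (by omega)]
    have := Nat.le_findGreatest (by omega : v.toNat ≤ n.toNat) hPv
    rw [hEq]
    omega
  obtain ⟨i0, hfac⟩ := hwd
  have hwi : pvW0 n ≤ i0 := by nlinarith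
  have hi1 : 1 ≤ i0 := by nlinarith
  have hin : i0 ≤ n := Int.le_of_dvd (by omega) ⟨pvW0 n, by linarith [hfac]⟩
  have hA : constructRectangle n = [i0, pvW0 n] := by
    unfold constructRectangle
    exact pv_aloop_main n (pvW0 n) i0 hn hwpos hfac hwi hmax n.toNat n le_rfl hin le_rfl _
  have hB : constructRectangle_alt n = [i0, pvW0 n] := by
    unfold constructRectangle_alt
    rw [if_neg (by omega)]
    exact pv_bloop_main n (pvW0 n) i0 hn hwpos hfac hws hmax n.toNat 1 1 (by omega)
      le_rfl le_rfl le_rfl (one_dvd n) (by omega) (fun v hv1 _ _ hvw => by omega)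
  rw [hA, hB]

-- ===== VERDICT (by name: the statement is the Claim_ definition above) =====
theorem constructRectangle_spec : Claim_equal_constructRectangle := by
  intro area _
  unfold Spec_constructRectangle
  by_cases h : area ≤ 0
  · unfold constructRectangle constructRectangle_alt
    rw [PySem.List.pyRange_neg_one_eq_nil h, if_pos h]
    rfl
  · exact pv_main area (by omega)
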